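-- pv_equiv track=rewrite | github.com/DFKI-NLP/sam | analysis/brat_utils.py | append_suffix_to_labels_and_ids
-- ===== SOURCE A (Python) =====
-- from typing import List, Dict, Optional
--
-- def append_suffix_to_labels_and_ids(annotations: List[str], suffix: Optional[str] = None) -> List[str]:
--     if suffix is None:
--         return annotations
--     res = []
--     for annot in annotations:
--         _id, _remaining = annot.split("\t", maxsplit=1)
--         _id += suffix
--         parts = _remaining.split("\t", maxsplit=1)
--         text = parts[1] if len(parts) > 1 else None
--         _label, _targets = parts[0].split(" ", maxsplit=1)
--         _label += f'-{suffix}'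
--         _targets_list = []
--         for _target_pair in _targets.split(";"):
--             _target_list = []
--             for t in _target_pair.split(" "):
--                 if ":" in t:
--                     t += suffix
--                 _target_list.append(t)
--             _targets_list.append(" ".join(_target_list))
--         _targets = ";".join(_targets_list)
--         annot_new = f'{_id}\t{_label} {_targets}'
--         if text is not None:
--             annot_new += f'\t{text}'
--         #assert annot_new == annot , f'mismatch: "{annot_new}" != "{annot}"'
--         res.append(annot_new)
--     return res
-- ===== SOURCE B (Python) =====
-- from typing import List, Optional
--
-- def append_suffix_to_labels_and_ids(annotations: List[str], suffix: Optional[str] = None) -> List[str]: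
--     if suffix is None:
--         return annotations
--     out = []
--     for annot in annotations:
--         _id, remaining = annot.split("\t", 1)
--         parts = remaining.split("\t", 1)
--         label, targets = parts[0].split(" ", 1)
--         pieces = []
--         tok = []
--         for ch in targets:
--             if ch == " " or ch == ";":
--                 t = "".join(tok)
--                 pieces.append(t + suffix if ":" in t else t)
--                 pieces.append(ch)
--                 tok = []
--             else:
--                 tok.append(ch)
--         t = "".join(tok)
--         pieces.append(t + suffix if ":" in t else t)
--         new = _id + suffix + "\t" + label + "-" + suffix + " " + "".join(pieces)
--         if len(parts) > 1:
--             new += "\t" + parts[1]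
--         out.append(new)
--     return out
-- ===== Notes on version B (the rewrite author's own statement) =====
-- stated objective: alternative
-- what changed: Replaced A's nested split-on-';'/split-on-' ' double loop with joins by a single left-to-right character scan over the targets string that flushes tokens at delimiters, and rebuilt each line by plain concatenation instead of f-strings.
import Mathlib
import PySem

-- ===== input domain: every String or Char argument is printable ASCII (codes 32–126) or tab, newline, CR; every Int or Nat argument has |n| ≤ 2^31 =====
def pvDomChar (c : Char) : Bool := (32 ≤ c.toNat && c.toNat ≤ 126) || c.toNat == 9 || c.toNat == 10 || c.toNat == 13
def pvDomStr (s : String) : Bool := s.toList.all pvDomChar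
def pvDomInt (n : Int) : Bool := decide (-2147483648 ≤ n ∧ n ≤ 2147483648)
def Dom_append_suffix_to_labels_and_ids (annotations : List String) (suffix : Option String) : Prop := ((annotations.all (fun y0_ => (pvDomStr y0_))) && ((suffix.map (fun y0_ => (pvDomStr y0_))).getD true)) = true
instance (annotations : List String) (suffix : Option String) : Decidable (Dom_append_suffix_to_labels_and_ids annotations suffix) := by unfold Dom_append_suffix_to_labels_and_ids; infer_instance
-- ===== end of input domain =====

-- B replaces A's nested split-on-';'/split-on-' ' double loop with joins by a single
-- left-to-right character scan over the targets string that flushes tokens at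
-- delimiters, and rebuilds the line by plain concatenation (objective: alternative).
-- Both Pythons raise ValueError on the same inputs (annotation without a tab, or
-- without a space before its second tab); there the ports both return [].

-- ===== PORT A =====
-- exact hand port of s.split(sep, maxsplit=1) for a one-character separator
def pvSplit1 (d : Char) (cs : List Char) : List (List Char) :=
  if cs.contains d then [cs.takeWhile (· != d), (cs.dropWhile (· != d)).tail] else [cs]

-- exact hand port of s.split(sep) (no maxsplit) for a one-character separator
def pvSplitAll (d : Char) : List Char → List (List Char)
  | [] => [[]]
  | c :: cs =>
    if c = d then [] :: pvSplitAll d cs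
    else match pvSplitAll d cs with
      | [] => [[c]]          -- unreachable: pvSplitAll never returns []
      | h :: t => (c :: h) :: t

-- exact hand port of sep.join(list) for a one-character separator
def pvJoin (d : Char) : List (List Char) → List Char
  | [] => []
  | [x] => x
  | x :: y :: xs => x ++ d :: pvJoin d (y :: xs)

-- one iteration of A's loop body; none = the ValueError raised by tuple unpacking
def pvProcA (sfx : List Char) (cs : List Char) : Option (List Char) :=
  match pvSplit1 '\t' cs with
  | [i, remaining] =>
    let i := i ++ sfx
    let parts := pvSplit1 '\t' remaining
    let text : Option (List Char) := match parts with | _ :: t :: _ => some t | _ => none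
    match pvSplit1 ' ' (parts.headD []) with
    | [label, targets] =>
      let label := label ++ '-' :: sfx
      let targets := pvJoin ';' ((pvSplitAll ';' targets).map (fun pair =>
        pvJoin ' ' ((pvSplitAll ' ' pair).map (fun t =>
          if t.contains ':' then t ++ sfx else t))))
      some ((i ++ '\t' :: label ++ ' ' :: targets) ++
        (match text with | some tx => '\t' :: tx | none => []))
    | _ => none
  | _ => none

def append_suffix_to_labels_and_ids (annotations : List String) (suffix : Option String) : List String :=
  match suffix with
  | none => annotations
  | some s =>
    match annotations.foldl (fun acc annot => acc.bind fun r =>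
        (pvProcA s.toList annot.toList).map (fun x => r ++ [String.mk x])) (some []) with
    | some res => res
    | none => []   -- A raises ValueError here

-- ===== PORT B =====
-- B's character scan over the targets string (tok = current token accumulator)
def pvScan (sfx : List Char) (tok : List Char) : List Char → List Char
  | [] => if tok.contains ':' then tok ++ sfx else tok
  | c :: rest =>
    if c = ' ' ∨ c = ';' then
      (if tok.contains ':' then tok ++ sfx else tok) ++ c :: pvScan sfx [] rest
    else pvScan sfx (tok ++ [c]) rest

-- one iteration of B's loop body; none = the ValueError raised by tuple unpacking
def pvProcB (sfx : List Char) (cs : List Char) : Option (List Char) :=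
  match pvSplit1 '\t' cs with
  | [i, remaining] =>
    let parts := pvSplit1 '\t' remaining
    match pvSplit1 ' ' (parts.headD []) with
    | [label, targets] =>
      some (i ++ sfx ++ '\t' :: label ++ '-' :: sfx ++ ' ' :: pvScan sfx [] targets ++
        (match parts with | _ :: t :: _ => '\t' :: t | _ => []))
    | _ => none
  | _ => none

def append_suffix_to_labels_and_ids_alt (annotations : List String) (suffix : Option String) : List String :=
  match suffix with
  | none => annotations
  | some s =>
    match annotations.mapM (fun a => (pvProcB s.toList a.toList).map (fun x => String.mk x)) with
    | some res => res
    | none => []   -- B raises ValueError here, on the same inputs as A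

-- ===== PRECONDITION & SPEC =====
-- annotation is well-formed: has a tab, and the field between the first tab and the
-- next tab (or end) contains a space
def pvOkA (cs : List Char) : Bool :=
  cs.contains '\t' && (((cs.dropWhile (· != '\t')).tail).takeWhile (· != '\t')).contains ' '

-- Pre_ excludes exactly the inputs on which A (and B) raise ValueError: suffix not
-- None and some annotation without a tab or without a space before its second tab
def Pre_append_suffix_to_labels_and_ids (annotations : List String) (suffix : Option String) : Prop :=
  suffix = none ∨ ∀ a ∈ annotations, pvOkA a.toList = true
instance (annotations : List String) (suffix : Option String) : Decidable (Pre_append_suffix_to_labels_and_ids annotations suffix) := by unfold Pre_append_suffix_to_labels_and_ids; infer_instance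

def pvWitness_append_suffix_to_labels_and_ids : List String × Option String :=
  (["T1\tLabel 0 5\thello"], some "_s")

def Spec_append_suffix_to_labels_and_ids (annotations : List String) (suffix : Option String) (out : List String) : Prop := out = append_suffix_to_labels_and_ids_alt annotations suffix
instance (annotations : List String) (suffix : Option String) (out : List String) : Decidable (Spec_append_suffix_to_labels_and_ids annotations suffix out) := by unfold Spec_append_suffix_to_labels_and_ids; infer_instance

-- ===== CLAIM (what is proved, stated in full; the proofs are below) =====
def Claim_equal_append_suffix_to_labels_and_ids : Prop := ∀ (annotations : List String) (suffix : Option String), Dom_append_suffix_to_labels_and_ids annotations suffix → Pre_append_suffix_to_labels_and_ids annotations suffix → Spec_append_suffix_to_labels_and_ids annotations suffix (append_suffix_to_labels_and_ids annotations suffix)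

-- ===== LEMMAS AND PROOFS =====

theorem pvSplitAll_ne_nil (d : Char) (cs : List Char) : pvSplitAll d cs ≠ [] := by
  induction cs with
  | nil => simp [pvSplitAll]
  | cons c cs ih =>
    simp only [pvSplitAll]
    split
    · simp
    · cases h : pvSplitAll d cs with
      | nil => exact absurd h ih
      | cons a t => simp [h]

-- head-modifier used to state the scan invariant
def pvMapHead (f : List Char → List Char) : List (List Char) → List (List Char)
  | [] => []
  | h :: t => f h :: t

theorem pvMapHead_nil (l : List (List Char)) : pvMapHead (([] : List Char) ++ ·) l = l := by
  cases l <;> simp [pvMapHead]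

theorem pvSplitAll_cons_ne (d c : Char) (cs : List Char) (h : c ≠ d) :
    pvSplitAll d (c :: cs) = pvMapHead (c :: ·) (pvSplitAll d cs) := by
  simp only [pvSplitAll, if_neg h]
  cases hs : pvSplitAll d cs with
  | nil => exact absurd hs (pvSplitAll_ne_nil d cs)
  | cons a t => simp [pvMapHead]

theorem pvSplitAll_no_sep (d : Char) (tok : List Char) (h : tok.contains d = false) :
    pvSplitAll d tok = [tok] := by
  induction tok with
  | nil => rfl
  | cons c cs ih =>
    simp only [List.contains_cons, Bool.or_eq_false_iff, beq_eq_false_iff_ne] at h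
    rw [pvSplitAll_cons_ne d c cs h.1.symm, ih h.2]
    rfl

theorem pvSplitAll_append_sep (d : Char) (tok rest : List Char) (h : tok.contains d = false) :
    pvSplitAll d (tok ++ d :: rest) = tok :: pvSplitAll d rest := by
  induction tok with
  | nil => simp [pvSplitAll]
  | cons c cs ih =>
    simp only [List.contains_cons, Bool.or_eq_false_iff, beq_eq_false_iff_ne] at h
    rw [List.cons_append, pvSplitAll_cons_ne d c _ h.1.symm, ih h.2]
    rfl

theorem pvJoin_cons_append (d : Char) (a b : List Char) (xs : List (List Char)) :
    pvJoin d ((a ++ b) :: xs) = a ++ pvJoin d (b :: xs) := by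
  cases xs <;> simp [pvJoin]

theorem pvJoin_cons_cons (d c : Char) (b : List Char) (xs : List (List Char)) :
    pvJoin d ((c :: b) :: xs) = c :: pvJoin d (b :: xs) := by
  cases xs <;> rfl

theorem pvJoin_cons_of_ne_nil (d : Char) (x : List Char) (xs : List (List Char)) (h : xs ≠ []) :
    pvJoin d (x :: xs) = x ++ d :: pvJoin d xs := by
  cases xs with
  | nil => exact absurd rfl h
  | cons y t => rfl

-- the A-side nested split/join transform of a targets string
def pvNested (sfx : List Char) (cs : List Char) : List Char :=
  pvJoin ';' ((pvSplitAll ';' cs).map (fun pair =>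
    pvJoin ' ' ((pvSplitAll ' ' pair).map (fun t =>
      if t.contains ':' then t ++ sfx else t))))

-- invariant of B's scan: with a delimiter-free accumulator tok it computes the
-- nested transform with tok prepended to the first token
theorem pvScan_eq_nested (sfx : List Char) (cs : List Char) : ∀ tok : List Char,
    tok.contains ' ' = false → tok.contains ';' = false →
    pvScan sfx tok cs =
      pvJoin ';' ((pvMapHead (tok ++ ·) (pvSplitAll ';' cs)).map (fun pair =>
        pvJoin ' ' ((pvSplitAll ' ' pair).map (fun t =>
          if t.contains ':' then t ++ sfx else t)))) := by
  induction cs with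
  | nil =>
    intro tok h1 _
    simp [pvScan, pvSplitAll, pvMapHead, pvSplitAll_no_sep ' ' tok h1, pvJoin]
  | cons c rest ih =>
    intro tok h1 h2
    by_cases hc : c = ' ' ∨ c = ';'
    · rcases hc with hc | hc
      · subst hc
        rw [pvScan, if_pos (Or.inl rfl)]
        rw [pvSplitAll_cons_ne ';' ' ' rest (by decide)]
        cases hs : pvSplitAll ';' rest with
        | nil => exact absurd hs (pvSplitAll_ne_nil ';' rest)
        | cons h0 t0 =>
          simp only [pvMapHead, List.map_cons]
          rw [pvSplitAll_append_sep ' ' tok h0 h1, List.map_cons,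
            pvJoin_cons_of_ne_nil ' ' _ _ (by
              cases hg : pvSplitAll ' ' h0 with
              | nil => exact absurd hg (pvSplitAll_ne_nil ' ' h0)
              | cons a b => simp),
            pvJoin_cons_append, pvJoin_cons_cons]
          have hrec := ih [] rfl rfl
          rw [pvMapHead_nil] at hrec
          rw [hrec, hs, List.map_cons]
      · subst hc
        rw [pvScan, if_pos (Or.inr rfl)]
        have hsplit : pvSplitAll ';' (';' :: rest) = [] :: pvSplitAll ';' rest := by
          simp [pvSplitAll]
        rw [hsplit]
        simp only [pvMapHead, List.map_cons, List.append_nil]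
        rw [pvSplitAll_no_sep ' ' tok h1]
        have hne : (pvSplitAll ';' rest).map (fun pair =>
            pvJoin ' ' ((pvSplitAll ' ' pair).map (fun t =>
              if t.contains ':' then t ++ sfx else t))) ≠ [] := by
          simp [pvSplitAll_ne_nil ';' rest]
        rw [List.map_cons, List.map_nil,
          show pvJoin ' ' [if tok.contains ':' then tok ++ sfx else tok] =
            (if tok.contains ':' then tok ++ sfx else tok) from rfl,
          pvJoin_cons_of_ne_nil ';' _ _ hne]
        have hrec := ih [] rfl rfl
        rw [pvMapHead_nil] at hrec
        rw [hrec]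
    · push_neg at hc
      rw [pvScan, if_neg (by tauto)]
      rw [pvSplitAll_cons_ne ';' c rest hc.2]
      cases hs : pvSplitAll ';' rest with
      | nil => exact absurd hs (pvSplitAll_ne_nil ';' rest)
      | cons h0 t0 =>
        have hrec := ih (tok ++ [c])
          (by simp; exact ⟨by simpa using h1, fun he => hc.1 he.symm⟩)
          (by simp; exact ⟨by simpa using h2, fun he => hc.2 he.symm⟩)
        rw [hrec, hs]
        simp [pvMapHead]

-- per-annotation agreement (total: both sides are none exactly on A's ValueError lines)
theorem proc_eq (sfx cs : List Char) : pvProcA sfx cs = pvProcB sfx cs := by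
  by_cases htab : '\t' ∈ cs
  · by_cases hc : '\t' ∈ (cs.dropWhile (· != '\t')).tail
    · by_cases hsp : ' ' ∈ ((cs.dropWhile (· != '\t')).tail).takeWhile (· != '\t')
      · have hscan := pvScan_eq_nested sfx
          ((((cs.dropWhile (· != '\t')).tail.takeWhile (· != '\t')).dropWhile (· != ' ')).tail)
          [] rfl rfl
        rw [pvMapHead_nil] at hscan
        simp [pvProcA, pvProcB, pvSplit1, htab, hc, hsp, hscan]
      · simp [pvProcA, pvProcB, pvSplit1, htab, hc, hsp]
    · by_cases hsp : ' ' ∈ (cs.dropWhile (· != '\t')).tail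
      · have hscan := pvScan_eq_nested sfx
          ((((cs.dropWhile (· != '\t')).tail).dropWhile (· != ' ')).tail) [] rfl rfl
        rw [pvMapHead_nil] at hscan
        simp [pvProcA, pvProcB, pvSplit1, htab, hc, hsp, hscan]
      · simp [pvProcA, pvProcB, pvSplit1, htab, hc, hsp]
  · simp [pvProcA, pvProcB, pvSplit1, htab]

-- A's fold keeps none once an annotation fails
theorem fold_none (s : List Char) (t : List String) :
    t.foldl (fun acc annot => acc.bind fun r =>
        (pvProcA s annot.toList).map (fun x => r ++ [String.mk x])) none = none := by
  induction t with
  | nil => rfl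
  | cons b u ihu => simpa using ihu

-- A's fold with ValueError propagation equals B's mapM, modulo the accumulator prefix
theorem fold_eq (s : List Char) (l : List String) (acc : List String) :
    l.foldl (fun acc annot => acc.bind fun r =>
        (pvProcA s annot.toList).map (fun x => r ++ [String.mk x])) (some acc) =
      (l.mapM (fun a => (pvProcB s a.toList).map (fun x => String.mk x))).map (acc ++ ·) := by
  induction l generalizing acc with
  | nil => simp
  | cons a t ih =>
    rw [List.foldl_cons, proc_eq s a.toList]
    cases hb : pvProcB s a.toList with
    | none => simp [hb, fold_none]
    | some x =>
      simp only [hb, Option.map_some, Option.bind_some]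
      rw [ih (acc ++ [String.mk x])]
      cases ht : t.mapM (fun a => (pvProcB s a.toList).map (fun x => String.mk x)) with
      | none => simp [List.mapM_cons, hb, ht]
      | some ys => simp [List.mapM_cons, hb, ht]

-- ===== VERDICT (by name: the statement is the Claim_ definition above) =====
theorem append_suffix_to_labels_and_ids_spec : Claim_equal_append_suffix_to_labels_and_ids := by
  intro annotations suffix _ _
  unfold Spec_append_suffix_to_labels_and_ids
  cases suffix with
  | none => rfl
  | some s =>
    simp only [append_suffix_to_labels_and_ids, append_suffix_to_labels_and_ids_alt]
    rw [fold_eq s.toList annotations []]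
    cases h : annotations.mapM (fun a => (pvProcB s.toList a.toList).map (fun x => String.mk x)) with
    | none => simp
    | some res => simp
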